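-- pv_equiv track=rewrite | github.com/isaac0821/vrpSolver | vrpSolver/PMS.py | heuPMS
-- ===== SOURCE A (Python) =====
-- def heuPMS(
--     numMachines: "Number of parallel machines" = None,
--     jobLen:     "List, length of each job" = None,
--     algo:       "Algorithm for the heuristic \
--                  1) String, 'LPT', Longest Processing Time first" = "LPT"
--     ) -> "Exact solution for PMS":
--
--     # Initialize ==============================================================
--     ts = {}
--     for m in range(numMachines):
--         ts[m] = 0
--
--     # Sort job length =========================================================
--     jobLen.sort(reverse=True)
--     for l in jobLen:
--         # Get the machine with shortest timespan
--         m = sorted(ts, key = lambda x: ts[x])[0]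
--         ts[m] += l
--
--     # Get timespan ============================================================
--     timespan = max(ts.values())
--
--     return {
--         'timespan': timespan
--     }
-- ===== SOURCE B (Python) =====
-- def _insert_sorted(xs, v):
--     # insert v into ascending-sorted xs, after equal elements
--     for i, x in enumerate(xs):
--         if x > v:
--             return xs[:i] + [v] + xs[i:]
--     return xs + [v]
--
-- def heuPMS(
--     numMachines=None,
--     jobLen=None,
--     algo="LPT"
--     ):
--     # loads kept as an ascending-sorted list of machine timespans
--     loads = [0] * numMachines
--     for l in sorted(jobLen, reverse=True):
--         loads = _insert_sorted(loads[1:], loads[0] + l)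
--     return {
--         'timespan': loads[-1]
--     }
-- ===== Notes on version B (the rewrite author's own statement) =====
-- stated objective: faster
-- what changed: A keeps a dict of machine loads and re-sorts all m machines by load for every job to find the least-loaded one; B keeps only the multiset of loads as an ascending-sorted list, pops its head (the minimum) and re-inserts head+job in sorted position, dropping machine identities and the per-job sort entirely.
import Mathlib
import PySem

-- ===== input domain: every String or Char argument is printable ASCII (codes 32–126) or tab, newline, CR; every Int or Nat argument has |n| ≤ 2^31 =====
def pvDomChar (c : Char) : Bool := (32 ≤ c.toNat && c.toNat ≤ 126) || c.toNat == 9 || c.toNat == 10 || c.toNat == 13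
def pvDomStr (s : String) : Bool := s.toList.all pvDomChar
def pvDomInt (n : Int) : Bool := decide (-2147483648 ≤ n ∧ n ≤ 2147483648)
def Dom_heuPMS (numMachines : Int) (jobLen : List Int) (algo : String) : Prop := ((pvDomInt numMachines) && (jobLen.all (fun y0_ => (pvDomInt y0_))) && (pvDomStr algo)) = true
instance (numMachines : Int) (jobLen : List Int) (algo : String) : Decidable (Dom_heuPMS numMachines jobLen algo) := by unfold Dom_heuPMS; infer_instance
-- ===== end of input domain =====

-- B replaces A's per-job full sort of the machine-load dict by an ascending-sorted list of
-- loads with pop-min/sorted-reinsert (objective: a cheaper per-job step).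
-- NOTE: Python A sorts jobLen IN PLACE (jobLen.sort(reverse=True)); B does not mutate its
-- argument. The equivalence proved here is about the RETURN value only.

-- ===== PORT A =====
-- Python A's dict ts = {m: 0 for m in range(numMachines)} has key list EXACTLY
-- range(numMachines), in that order, throughout the run (the loop only updates existing
-- keys), so it is ported exactly as the array of its values, with pyRange as its key list.
def heuPMS (numMachines : Int) (jobLen : List Int) (algo : String) : List (String × Int) :=
  -- ts = {}; for m in range(numMachines): ts[m] = 0
  let ts0 : Array Int := (PySem.List.pyRange 0 numMachines 1).foldl (fun a _ => a.push 0) #[]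
  -- jobLen.sort(reverse=True); for l in jobLen:
  --   m = sorted(ts, key = lambda x: ts[x])[0]   -- Python's sorted is a STABLE sort of the
  --     key list; List.mergeSort is stable with the same load comparator, so it is exact.
  --     ([0] raises IndexError on an empty dict: Pre_ demands 1 ≤ numMachines; the headD 0
  --     filler is unreachable inside Pre_.)
  --   ts[m] += l   -- m is always a present key; x.toNat is exact since every key is ≥ 0
  let ts := (PySem.List.sorted jobLen (fun x => x) true).foldl
      (fun a l =>
        let ks := (PySem.List.pyRange 0 numMachines 1).mergeSort
            (fun x y => a.getD x.toNat 0 ≤ a.getD y.toNat 0)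
        let m := ks.headD 0
        a.setIfInBounds m.toNat (a.getD m.toNat 0 + l)) ts0
  -- timespan = max(ts.values())  (raises ValueError on an empty dict: excluded by Pre_)
  [("timespan", (PySem.List.max? ts.toList (fun x => x)).getD 0)]

-- ===== PORT B =====
-- _insert_sorted(xs, v): i = first index with xs[i] > v (len(xs) if none);
-- result = xs[:i] + [v] + xs[i:]
def pvInsSorted (xs : List Int) (v : Int) : List Int :=
  let i := xs.findIdx (fun x => v < x)
  xs.take i ++ v :: xs.drop i

def heuPMS_alt (numMachines : Int) (jobLen : List Int) (algo : String) : List (String × Int) :=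
  -- loads = [0]*numMachines  ([0]*n is empty for n ≤ 0, like Int.toNat)
  -- for l in sorted(jobLen, reverse=True): loads = _insert_sorted(loads[1:], loads[0] + l)
  -- (loads[1:] is exactly List.drop 1; loads[0] raises on empty: excluded by Pre_)
  let loads := (PySem.List.sorted jobLen (fun x => x) true).foldl
      (fun ls l => pvInsSorted (ls.drop 1) (ls.headD 0 + l))
      (List.replicate numMachines.toNat 0)
  -- return {'timespan': loads[-1]}
  [("timespan", (PySem.List.pyGet? loads (-1)).getD 0)]

-- ===== PRECONDITION & SPEC =====
-- Pre_ excludes numMachines ≤ 0, on which Python A raises (IndexError on sorted(ts,…)[0]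
-- for a nonempty job list, ValueError on max(()) for an empty one).
def Pre_heuPMS (numMachines : Int) (jobLen : List Int) (algo : String) : Prop :=
  1 ≤ numMachines
instance (numMachines : Int) (jobLen : List Int) (algo : String) : Decidable (Pre_heuPMS numMachines jobLen algo) := by unfold Pre_heuPMS; infer_instance
def pvWitness_heuPMS : Int × List Int × String := (2, [3, 1, 4, 1, 5], "LPT")

def Spec_heuPMS (numMachines : Int) (jobLen : List Int) (algo : String) (out : List (String × Int)) : Prop := out = heuPMS_alt numMachines jobLen algo
instance (numMachines : Int) (jobLen : List Int) (algo : String) (out : List (String × Int)) : Decidable (Spec_heuPMS numMachines jobLen algo out) := by unfold Spec_heuPMS; infer_instance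

-- ===== CLAIM (what is proved, stated in full; the proofs are below) =====
def Claim_equal_heuPMS : Prop := ∀ (numMachines : Int) (jobLen : List Int) (algo : String), Dom_heuPMS numMachines jobLen algo → Pre_heuPMS numMachines jobLen algo → Spec_heuPMS numMachines jobLen algo (heuPMS numMachines jobLen algo)

-- ===== LEMMAS AND PROOFS =====

-- The coupling invariant: B's list is an ascending-sorted arrangement of A's machine loads,
-- and A keeps exactly numMachines machines.
def pvInv (n : Int) (a : Array Int) (ls : List Int) : Prop :=
  ls.Perm a.toList ∧ ls.Pairwise (· ≤ ·) ∧ a.size = n.toNat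

-- recursive form of B's sorted insertion, used only by the proofs
def pvInsRec : List Int → Int → List Int
  | [], v => [v]
  | x :: xs, v => if v < x then v :: x :: xs else x :: pvInsRec xs v

lemma pvInsSorted_eq_rec (xs : List Int) (v : Int) : pvInsSorted xs v = pvInsRec xs v := by
  induction xs with
  | nil => simp [pvInsSorted, pvInsRec]
  | cons x xs ih =>
    simp only [pvInsSorted, pvInsRec, List.findIdx_cons]
    by_cases h : v < x
    · simp [h]
    · simp only [h, decide_false, cond_false, List.take_succ_cons, List.drop_succ_cons,
        List.cons_append]
      exact congrArg (x :: ·) ih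

lemma pvInsRec_perm (xs : List Int) (v : Int) : (pvInsRec xs v).Perm (v :: xs) := by
  induction xs with
  | nil => simp [pvInsRec]
  | cons x xs ih =>
    simp only [pvInsRec]
    split
    · exact List.Perm.refl _
    · exact (ih.cons x).trans (List.Perm.swap v x xs)

lemma pvInsRec_pairwise (xs : List Int) (v : Int) (h : xs.Pairwise (· ≤ ·)) :
    (pvInsRec xs v).Pairwise (· ≤ ·) := by
  induction xs with
  | nil => simp [pvInsRec]
  | cons x xs ih =>
    rcases List.pairwise_cons.mp h with ⟨hx, hxs⟩
    simp only [pvInsRec]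
    split
    · rename_i hlt
      refine List.pairwise_cons.mpr ⟨?_, h⟩
      intro y hy
      rcases List.mem_cons.mp hy with rfl | hy
      · exact le_of_lt hlt
      · exact le_of_lt (lt_of_lt_of_le hlt (hx _ hy))
    · rename_i hnl
      refine List.pairwise_cons.mpr ⟨?_, ih hxs⟩
      intro y hy
      rcases List.mem_cons.mp ((pvInsRec_perm xs v).mem_iff.mp hy) with rfl | hy
      · exact le_of_not_gt hnl
      · exact hx _ hy

lemma pvLe_getLast : ∀ (ls : List Int), ls.Pairwise (· ≤ ·) → ∀ y ∈ ls, ∀ h : ls ≠ [], y ≤ ls.getLast h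
  | [], _, y, hy, _ => absurd hy (by simp)
  | [x], _, y, hy, _ => by simp at hy; simp [hy, List.getLast]
  | x :: z :: zs, hp, y, hy, h => by
    rcases List.pairwise_cons.mp hp with ⟨hx, hxs⟩
    rw [List.getLast_cons (by simp)]
    rcases List.mem_cons.mp hy with rfl | hy
    · exact hx _ (List.getLast_mem (by simp))
    · exact pvLe_getLast (z :: zs) hxs y hy (by simp)

-- the loads array read through A's key list is exactly its value list
lemma pvMap_pyRange_getD (n : Int) (a : Array Int) (h : a.size = n.toNat) :
    (PySem.List.pyRange 0 n 1).map (fun x => a.getD x.toNat 0) = a.toList := by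
  apply List.ext_getElem
  · simp [PySem.List.length_pyRange_one, h]
  · intro j h1 h2
    have hj : j < a.size := by simpa using h2
    have hr : j < (PySem.List.pyRange 0 n 1).length := by simpa using h1
    simp only [List.getElem_map, PySem.List.getElem_pyRange_one, zero_add, Int.toNat_natCast]
    simp [Array.getD, hj]

lemma pvInv_step (n : Int) (hn : 1 ≤ n) (a : Array Int) (ls : List Int) (l : Int)
    (h : pvInv n a ls) :
    pvInv n
      (a.setIfInBounds (((PySem.List.pyRange 0 n 1).mergeSort
          (fun x y => a.getD x.toNat 0 ≤ a.getD y.toNat 0)).headD 0).toNat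
        (a.getD (((PySem.List.pyRange 0 n 1).mergeSort
          (fun x y => a.getD x.toNat 0 ≤ a.getD y.toNat 0)).headD 0).toNat 0 + l))
      (pvInsSorted (ls.drop 1) (ls.headD 0 + l)) := by
  obtain ⟨hperm, hsort, hsize⟩ := h
  have hpos : 0 < a.size := by omega
  -- ls is nonempty (it has as many entries as A has machines)
  obtain ⟨v, rest, rfl⟩ : ∃ v rest, ls = v :: rest := by
    cases ls with
    | nil =>
      have := hperm.length_eq
      simp at this
      omega
    | cons v rest => exact ⟨v, rest, rfl⟩
  -- the head of A's sorted key list is a key of minimal load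
  have htotal : ∀ x y : Int, ((fun x y => decide (a.getD x.toNat 0 ≤ a.getD y.toNat 0)) x y
      || (fun x y => decide (a.getD x.toNat 0 ≤ a.getD y.toNat 0)) y x) = true := by
    intro x y; simpa using le_total (a.getD x.toNat 0) (a.getD y.toNat 0)
  have htrans : ∀ x y z : Int, (fun x y => decide (a.getD x.toNat 0 ≤ a.getD y.toNat 0)) x y = true →
      (fun x y => decide (a.getD x.toNat 0 ≤ a.getD y.toNat 0)) y z = true →
      (fun x y => decide (a.getD x.toNat 0 ≤ a.getD y.toNat 0)) x z = true := by
    intro x y z hxy hyz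
    simp only [decide_eq_true_eq] at *
    exact le_trans hxy hyz
  obtain ⟨m, t, hK⟩ : ∃ m t, (PySem.List.pyRange 0 n 1).mergeSort
      (fun x y => a.getD x.toNat 0 ≤ a.getD y.toNat 0) = m :: t := by
    cases hK : (PySem.List.pyRange 0 n 1).mergeSort
        (fun x y => a.getD x.toNat 0 ≤ a.getD y.toNat 0) with
    | nil =>
      have := (List.mergeSort_perm (PySem.List.pyRange 0 n 1)
        (fun x y => a.getD x.toNat 0 ≤ a.getD y.toNat 0)).length_eq
      rw [hK] at this
      simp [PySem.List.length_pyRange_one] at this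
      omega
    | cons m t => exact ⟨m, t, rfl⟩
  rw [hK]
  simp only [List.headD_cons]
  have hm_mem : m ∈ PySem.List.pyRange 0 n 1 :=
    (List.mergeSort_perm _ _).subset (hK ▸ List.mem_cons_self)
  have hmr := (PySem.List.mem_pyRange_one).mp hm_mem
  have hi : m.toNat < a.size := by omega
  have hmin : ∀ k ∈ PySem.List.pyRange 0 n 1, a.getD m.toNat 0 ≤ a.getD k.toNat 0 := by
    intro k hk
    have hk' : k ∈ m :: t := hK ▸ (List.mergeSort_perm _ _).symm.subset hk
    rcases List.mem_cons.mp hk' with rfl | hk'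
    · exact le_refl _
    · have hp := List.pairwise_mergeSort htrans htotal (PySem.List.pyRange 0 n 1)
      rw [hK] at hp
      have := (List.pairwise_cons.mp hp).1 k hk'
      simpa using this
  have hmap := pvMap_pyRange_getD n a hsize
  have hv_min : ∀ y ∈ v :: rest, v ≤ y := by
    intro y hy
    rcases List.mem_cons.mp hy with rfl | hy
    · exact le_refl _
    · exact (List.pairwise_cons.mp hsort).1 y hy
  -- the minimal load equals B's head v
  have hvm : a.getD m.toNat 0 = v := by
    have h1 : a.getD m.toNat 0 ∈ v :: rest := by
      refine hperm.symm.subset ?_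
      rw [← hmap]
      exact List.mem_map_of_mem hm_mem
    have h2 : v ∈ a.toList := hperm.subset List.mem_cons_self
    rw [← hmap] at h2
    obtain ⟨k, hk, hkv⟩ := List.mem_map.mp h2
    exact le_antisymm (hkv ▸ hmin k hk) (hv_min _ h1)
  have hgetd : a.getD m.toNat 0 = a.toList[m.toNat]'(by simpa using hi) := by
    simp [Array.getD, hi]
  -- split the value list at position m
  have hdec : a.toList = a.toList.take m.toNat ++ v :: a.toList.drop (m.toNat + 1) := by
    conv_lhs => rw [← List.take_append_drop m.toNat a.toList]
    rw [List.drop_eq_getElem_cons (by simpa using hi), ← hgetd, hvm]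
  have hset : (a.setIfInBounds m.toNat (a.getD m.toNat 0 + l)).toList
      = a.toList.take m.toNat ++ (v + l) :: a.toList.drop (m.toNat + 1) := by
    rw [Array.toList_setIfInBounds, List.set_eq_take_append_cons_drop,
      if_pos (by simpa using hi), hvm]
  have hrest : rest.Perm (a.toList.take m.toNat ++ a.toList.drop (m.toNat + 1)) := by
    have h1 : (v :: rest).Perm (v :: (a.toList.take m.toNat ++ a.toList.drop (m.toNat + 1))) :=
      (hdec ▸ hperm).trans List.perm_middle
    exact h1.cons_inv
  refine ⟨?_, ?_, ?_⟩
  · show (pvInsSorted rest (v + l)).Perm _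
    rw [hset, pvInsSorted_eq_rec]
    exact (pvInsRec_perm rest (v + l)).trans ((hrest.cons (v + l)).trans List.perm_middle.symm)
  · rw [pvInsSorted_eq_rec]
    exact pvInsRec_pairwise rest (v + l) (List.pairwise_cons.mp hsort).2
  · rw [Array.size_setIfInBounds]; exact hsize

lemma pvInv_foldl (n : Int) (hn : 1 ≤ n) (js : List Int) (a : Array Int) (ls : List Int)
    (h : pvInv n a ls) :
    pvInv n
      (js.foldl (fun a l =>
        let ks := (PySem.List.pyRange 0 n 1).mergeSort
            (fun x y => a.getD x.toNat 0 ≤ a.getD y.toNat 0)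
        let m := ks.headD 0
        a.setIfInBounds m.toNat (a.getD m.toNat 0 + l)) a)
      (js.foldl (fun ls l => pvInsSorted (ls.drop 1) (ls.headD 0 + l)) ls) := by
  induction js generalizing a ls with
  | nil => exact h
  | cons j js ih => exact ih _ _ (pvInv_step n hn a ls j h)

lemma pvPush_toList (l : List Int) (a : Array Int) :
    (l.foldl (fun a _ => a.push (0 : Int)) a).toList = a.toList ++ List.replicate l.length 0 := by
  induction l generalizing a with
  | nil => simp
  | cons x l ih => simp [List.foldl_cons, ih, Array.toList_push, List.replicate_succ]

lemma pvInv_init (numMachines : Int) (h : 1 ≤ numMachines) :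
    pvInv numMachines
      ((PySem.List.pyRange 0 numMachines 1).foldl (fun a _ => a.push 0) #[])
      (List.replicate numMachines.toNat 0) := by
  have htl : ((PySem.List.pyRange 0 numMachines 1).foldl
      (fun a _ => a.push (0 : Int)) #[]).toList = List.replicate numMachines.toNat 0 := by
    rw [pvPush_toList]
    simp [PySem.List.length_pyRange_one]
  refine ⟨by rw [htl], List.pairwise_replicate.mpr (Or.inr (le_refl 0)), ?_⟩
  simpa using congrArg List.length htl

lemma pvInv_final (n : Int) (hn : 1 ≤ n) (a : Array Int) (ls : List Int) (h : pvInv n a ls) :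
    (PySem.List.max? a.toList (fun x => x)).getD 0 = (PySem.List.pyGet? ls (-1)).getD 0 := by
  obtain ⟨hperm, hsort, hsize⟩ := h
  rw [PySem.List.pyGet?_neg_one]
  obtain ⟨x, t, hv⟩ : ∃ x t, a.toList = x :: t := by
    cases hv : a.toList with
    | nil =>
      have hlen : a.size = 0 := by simpa using congrArg List.length hv
      omega
    | cons x t => exact ⟨x, t, rfl⟩
  obtain ⟨v, rest, rfl⟩ : ∃ v rest, ls = v :: rest := by
    cases ls with
    | nil => rw [hv] at hperm; exact absurd hperm.nil_eq (by simp)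
    | cons v rest => exact ⟨v, rest, rfl⟩
  rw [hv, PySem.List.max?_id_cons, Option.getD_some]
  have hL : (v :: rest).getLast? = some ((v :: rest).getLast (by simp)) :=
    List.getLast?_eq_some_getLast (by simp)
  rw [hL, Option.getD_some]
  -- both sides are the maximum of the same multiset of loads
  have hub : ∀ y ∈ x :: t, y ≤ List.foldl max x t := by
    intro y hy
    rcases List.mem_cons.mp hy with rfl | hy
    · exact (PySem.List.le_foldl_max t y).1
    · exact (PySem.List.le_foldl_max t x).2 y hy
  have hMmem : List.foldl max x t ∈ x :: t := by
    rcases PySem.List.foldl_max_mem t x with h1 | h1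
    · rw [h1]; exact List.mem_cons_self
    · exact List.mem_cons_of_mem _ h1
  have hLmem : (v :: rest).getLast (by simp) ∈ v :: rest := List.getLast_mem _
  apply le_antisymm
  · exact pvLe_getLast _ hsort _ (hperm.symm.subset (hv ▸ hMmem)) _
  · exact hub _ (hv ▸ hperm.subset hLmem)

-- ===== VERDICT (by name: the statement is the Claim_ definition above) =====
theorem heuPMS_spec : Claim_equal_heuPMS := by
  intro numMachines jobLen algo _hDom hPre
  unfold Spec_heuPMS heuPMS heuPMS_alt
  have h := pvInv_foldl numMachines hPre (PySem.List.sorted jobLen (fun x => x) true) _ _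
    (pvInv_init numMachines hPre)
  simpa using congrArg (fun t => [(("timespan" : String), t)])
    (pvInv_final numMachines hPre _ _ h)
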